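-- pv_equiv track=rewrite | github.com/pacokwon/cs372-nlp | hw3/hw3.py | vowel_blacklist
-- ===== SOURCE A (Python) =====
-- def wo_stress(phonym):
--     if phonym[-1].isdigit():
--         return phonym[:-1]
--     else:
--         return phonym
--
-- def vowel_blacklist(tup):
--     blacklist = [("EH", "IH"), ("AH", "IH"), ("AA", "AO"), ("NG", "N")]
--
--     for el in blacklist:
--         if (
--             tup == el
--             or (wo_stress(tup[0]), wo_stress(tup[1])) == el
--             or (tup[1], tup[0]) == el
--             or (wo_stress(tup[1]), wo_stress(tup[0])) == el
--         ):
--             return True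
--     return False
-- ===== SOURCE B (Python) =====
-- def wo_stress(phonym):
--     if phonym[-1].isdigit():
--         return phonym[:-1]
--     else:
--         return phonym
--
-- def vowel_blacklist(tup):
--     # Canonicalize: strip stress digits and order the pair, then one lookup.
--     # The blacklist is symmetric-by-intent and stress-free, so A's four
--     # variant checks collapse to a single membership of the canonical form.
--     canon = {("AA", "AO"), ("AH", "IH"), ("EH", "IH"), ("N", "NG")}
--     a = wo_stress(tup[0])
--     b = wo_stress(tup[1])
--     return (min(a, b), max(a, b)) in canon
-- ===== Notes on version B (the rewrite author's own statement) =====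
-- stated objective: simpler
-- what changed: Instead of enumerating four variants of tup (raw, stripped, swapped, stripped-swapped) and scanning the blacklist for each, B canonicalizes the input once (strip stress, then order the pair lexicographically) and does a single membership test against a blacklist stored in canonical (stripped, sorted) form; correct because the blacklist entries are stress-free, so the raw checks are subsumed by the stripped ones, and ordering the pair replaces the swapped checks.
-- outside the precondition, e.g. on vowel_blacklist(('', 'AH0')): A raises IndexError, B raises IndexError
import Mathlib
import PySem

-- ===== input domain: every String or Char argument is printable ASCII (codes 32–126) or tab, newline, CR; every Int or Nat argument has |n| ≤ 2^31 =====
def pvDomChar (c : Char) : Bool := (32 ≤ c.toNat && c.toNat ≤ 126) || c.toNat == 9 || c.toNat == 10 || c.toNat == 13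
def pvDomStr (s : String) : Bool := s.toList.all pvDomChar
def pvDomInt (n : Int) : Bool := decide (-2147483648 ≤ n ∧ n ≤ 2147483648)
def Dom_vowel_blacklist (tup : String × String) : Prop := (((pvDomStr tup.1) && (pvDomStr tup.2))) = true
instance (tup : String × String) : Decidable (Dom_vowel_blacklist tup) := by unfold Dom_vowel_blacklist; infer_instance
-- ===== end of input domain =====

-- B canonicalizes the input once (strip stress, order the pair) and does a single membership
-- test against a canonical-form blacklist, instead of A's scan over four variants (objective: simpler).

-- ===== PORT A =====
-- shared helper of both sources: wo_stress (both Source A and Source B define it identically).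
-- phonym[-1] raises IndexError on the empty string; that input is excluded by Pre_ below.
def wo_stress (phonym : String) : String :=
  match PySem.Str.pyGet? phonym (-1) with
  | some c => if PySem.Chars.isdigit c then PySem.Str.slice phonym none (some (-1)) else phonym
  | none => phonym  -- unreachable under Pre_ (Python raises IndexError)

def vowel_blacklist (tup : String × String) : Bool :=
  let blacklist : List (String × String) := [("EH", "IH"), ("AH", "IH"), ("AA", "AO"), ("NG", "N")]
  -- for el in blacklist: if …: return True; return False
  blacklist.any (fun el =>
    tup == el
      || (wo_stress tup.1, wo_stress tup.2) == el
      || (tup.2, tup.1) == el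
      || (wo_stress tup.2, wo_stress tup.1) == el)

-- ===== PORT B =====
def vowel_blacklist_alt (tup : String × String) : Bool :=
  let canon : PySem.Set (String × String) :=
    PySem.Set.ofList [("AA", "AO"), ("AH", "IH"), ("EH", "IH"), ("N", "NG")]
  let a := wo_stress tup.1
  let b := wo_stress tup.2
  -- (min(a, b), max(a, b)) in canon;  min(a,b) = b if b < a else a, max(a,b) = b if a < b else a,
  -- with Python's code-point lexicographic string '<' = PySem.Chars.strLt on .toList (exact).
  PySem.Set.contains canon
    (if PySem.Chars.strLt b.toList a.toList then b else a,
     if PySem.Chars.strLt a.toList b.toList then b else a)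

-- ===== PRECONDITION & SPEC =====
-- A (and B) raise IndexError inside wo_stress when either component is the empty string.
def Pre_vowel_blacklist (tup : String × String) : Prop := tup.1 ≠ "" ∧ tup.2 ≠ ""
instance (tup : String × String) : Decidable (Pre_vowel_blacklist tup) := by unfold Pre_vowel_blacklist; infer_instance
def pvWitness_vowel_blacklist : (String × String) := ("AH0", "IH")

def Spec_vowel_blacklist (tup : String × String) (out : Bool) : Prop := out = vowel_blacklist_alt tup
instance (tup : String × String) (out : Bool) : Decidable (Spec_vowel_blacklist tup out) := by unfold Spec_vowel_blacklist; infer_instance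

-- ===== CLAIM (what is proved, stated in full; the proofs are below) =====
def Claim_equal_vowel_blacklist : Prop := ∀ (tup : String × String), Dom_vowel_blacklist tup → Pre_vowel_blacklist tup → Spec_vowel_blacklist tup (vowel_blacklist tup)

-- ===== LEMMAS AND PROOFS =====

-- A returns true exactly when the stripped pair, in either order, is a blacklist entry:
-- the raw checks are subsumed because wo_stress fixes every blacklist component.
theorem vowel_blacklist_iff (a b : String) :
    vowel_blacklist (a, b) = true ↔
      ((wo_stress a, wo_stress b) ∈ [("EH", "IH"), ("AH", "IH"), ("AA", "AO"), ("NG", "N")] ∨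
       (wo_stress b, wo_stress a) ∈ [("EH", "IH"), ("AH", "IH"), ("AA", "AO"), ("NG", "N")]) := by
  unfold vowel_blacklist
  simp only [List.any_eq_true, List.mem_cons, List.not_mem_nil, or_false,
    Bool.or_eq_true, beq_iff_eq, Prod.mk.injEq]
  have fEH : wo_stress "EH" = "EH" := by decide
  have fIH : wo_stress "IH" = "IH" := by decide
  have fAH : wo_stress "AH" = "AH" := by decide
  have fAA : wo_stress "AA" = "AA" := by decide
  have fAO : wo_stress "AO" = "AO" := by decide
  have fNG : wo_stress "NG" = "NG" := by decide
  have fN : wo_stress "N" = "N" := by decide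
  constructor
  · rintro ⟨el, hel, h⟩
    rcases hel with rfl | rfl | rfl | rfl <;>
      simp only [Prod.mk.injEq] at h <;>
      rcases h with ((⟨h1, h2⟩ | ⟨h1, h2⟩) | ⟨h1, h2⟩) | ⟨h1, h2⟩ <;>
      (try subst h1) <;> (try subst h2)
    · exact Or.inl (Or.inl ⟨fEH, fIH⟩)
    · exact Or.inl (Or.inl ⟨h1, h2⟩)
    · exact Or.inr (Or.inl ⟨fEH, fIH⟩)
    · exact Or.inr (Or.inl ⟨h1, h2⟩)
    · exact Or.inl (Or.inr (Or.inl ⟨fAH, fIH⟩))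
    · exact Or.inl (Or.inr (Or.inl ⟨h1, h2⟩))
    · exact Or.inr (Or.inr (Or.inl ⟨fAH, fIH⟩))
    · exact Or.inr (Or.inr (Or.inl ⟨h1, h2⟩))
    · exact Or.inl (Or.inr (Or.inr (Or.inl ⟨fAA, fAO⟩)))
    · exact Or.inl (Or.inr (Or.inr (Or.inl ⟨h1, h2⟩)))
    · exact Or.inr (Or.inr (Or.inr (Or.inl ⟨fAA, fAO⟩)))
    · exact Or.inr (Or.inr (Or.inr (Or.inl ⟨h1, h2⟩)))
    · exact Or.inl (Or.inr (Or.inr (Or.inr ⟨fNG, fN⟩)))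
    · exact Or.inl (Or.inr (Or.inr (Or.inr ⟨h1, h2⟩)))
    · exact Or.inr (Or.inr (Or.inr (Or.inr ⟨fNG, fN⟩)))
    · exact Or.inr (Or.inr (Or.inr (Or.inr ⟨h1, h2⟩)))
  · rintro (h | h) <;>
      rcases h with h | h | h | h
    · exact ⟨("EH", "IH"), by simp, by simp only [Prod.mk.injEq]; exact Or.inl (Or.inl (Or.inr h))⟩
    · exact ⟨("AH", "IH"), by simp, by simp only [Prod.mk.injEq]; exact Or.inl (Or.inl (Or.inr h))⟩
    · exact ⟨("AA", "AO"), by simp, by simp only [Prod.mk.injEq]; exact Or.inl (Or.inl (Or.inr h))⟩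
    · exact ⟨("NG", "N"), by simp, by simp only [Prod.mk.injEq]; exact Or.inl (Or.inl (Or.inr h))⟩
    · exact ⟨("EH", "IH"), by simp, by simp only [Prod.mk.injEq]; exact Or.inr h⟩
    · exact ⟨("AH", "IH"), by simp, by simp only [Prod.mk.injEq]; exact Or.inr h⟩
    · exact ⟨("AA", "AO"), by simp, by simp only [Prod.mk.injEq]; exact Or.inr h⟩
    · exact ⟨("NG", "N"), by simp, by simp only [Prod.mk.injEq]; exact Or.inr h⟩

-- B's single canonical lookup tests the same condition.
theorem alt_iff (a b : String) :
    vowel_blacklist_alt (a, b) = true ↔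
      ((wo_stress a, wo_stress b) ∈ [("EH", "IH"), ("AH", "IH"), ("AA", "AO"), ("NG", "N")] ∨
       (wo_stress b, wo_stress a) ∈ [("EH", "IH"), ("AH", "IH"), ("AA", "AO"), ("NG", "N")]) := by
  unfold vowel_blacklist_alt
  rw [PySem.Set.contains_iff]
  rw [show (PySem.Set.ofList [("AA","AO"),("AH","IH"),("EH","IH"),("N","NG")] : PySem.Set (String × String)) = [("AA","AO"),("AH","IH"),("EH","IH"),("N","NG")] from by decide]
  generalize wo_stress a = x
  generalize wo_stress b = y
  cases hba : PySem.Chars.strLt y.toList x.toList <;>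
    cases hab : PySem.Chars.strLt x.toList y.toList <;>
    simp only [hba, hab, if_true, if_false, Bool.false_eq_true, List.mem_cons,
      List.not_mem_nil, or_false, Prod.mk.injEq] <;>
    constructor
  -- case min = max = x (neither strictly smaller)
  · rintro (⟨h1, h2⟩ | ⟨h1, h2⟩ | ⟨h1, h2⟩ | ⟨h1, h2⟩) <;>
      subst h1 <;> exact absurd h2 (by decide)
  · rintro ((⟨h1, h2⟩ | ⟨h1, h2⟩ | ⟨h1, h2⟩ | ⟨h1, h2⟩) |
            (⟨h1, h2⟩ | ⟨h1, h2⟩ | ⟨h1, h2⟩ | ⟨h1, h2⟩)) <;>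
      subst h1 <;> subst h2 <;>
      first | (exact absurd hab (by decide)) | (exact absurd hba (by decide))
  -- case x < y: key = (x, y)
  · rintro (⟨h1, h2⟩ | ⟨h1, h2⟩ | ⟨h1, h2⟩ | ⟨h1, h2⟩) <;>
      subst h1 <;> subst h2 <;> decide
  · rintro ((⟨h1, h2⟩ | ⟨h1, h2⟩ | ⟨h1, h2⟩ | ⟨h1, h2⟩) |
            (⟨h1, h2⟩ | ⟨h1, h2⟩ | ⟨h1, h2⟩ | ⟨h1, h2⟩)) <;>
      subst h1 <;> subst h2 <;>
      first | decide | (exact absurd hab (by decide))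
  -- case y < x: key = (y, x)
  · rintro (⟨h1, h2⟩ | ⟨h1, h2⟩ | ⟨h1, h2⟩ | ⟨h1, h2⟩) <;>
      subst h1 <;> subst h2 <;> decide
  · rintro ((⟨h1, h2⟩ | ⟨h1, h2⟩ | ⟨h1, h2⟩ | ⟨h1, h2⟩) |
            (⟨h1, h2⟩ | ⟨h1, h2⟩ | ⟨h1, h2⟩ | ⟨h1, h2⟩)) <;>
      subst h1 <;> subst h2 <;>
      first | decide | (exact absurd hba (by decide))
  -- impossible case: both strictly smaller
  · simp only [PySem.Chars.strLt, decide_eq_true_eq] at hab hba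
    exact absurd hab (lt_asymm hba)
  · simp only [PySem.Chars.strLt, decide_eq_true_eq] at hab hba
    exact absurd hab (lt_asymm hba)

-- ===== VERDICT (by name: the statement is the Claim_ definition above) =====
theorem vowel_blacklist_spec : Claim_equal_vowel_blacklist := by
  intro ⟨a, b⟩ _ _
  show vowel_blacklist (a, b) = vowel_blacklist_alt (a, b)
  rw [Bool.eq_iff_iff, vowel_blacklist_iff, alt_iff]
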